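-- pv_equiv track=rewrite | github.com/inshell-art/path | ops/tools/audit.py | canonicalize_controls
-- ===== SOURCE A (Python) =====
-- CONTROL_ORDER = [f"AUD-{i:03d}" for i in range(1, 12)]
--
-- def canonicalize_controls(items: list[str]) -> list[str]:
--     seen = set()
--     ordered = []
--     for cid in CONTROL_ORDER:
--         if cid in items and cid not in seen:
--             ordered.append(cid)
--             seen.add(cid)
--     extras = sorted(set(items) - set(CONTROL_ORDER))
--     ordered.extend(extras)
--     return ordered
-- ===== SOURCE B (Python) =====
-- CONTROL_ORDER = [f"AUD-{i:03d}" for i in range(1, 12)]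
-- _RANK = {c: i for i, c in enumerate(CONTROL_ORDER)}
--
-- def canonicalize_controls(items: list[str]) -> list[str]:
--     return sorted(set(items), key=lambda c: (_RANK.get(c, len(CONTROL_ORDER)), c))
-- ===== Notes on version B (the rewrite author's own statement) =====
-- stated objective: simpler
-- what changed: Replaces A's two-phase build (scan the fixed control list collecting matches, then sort the leftover extras separately) by a single keyed sort of the deduplicated input using the key (rank-or-11, name).
import Mathlib
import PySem

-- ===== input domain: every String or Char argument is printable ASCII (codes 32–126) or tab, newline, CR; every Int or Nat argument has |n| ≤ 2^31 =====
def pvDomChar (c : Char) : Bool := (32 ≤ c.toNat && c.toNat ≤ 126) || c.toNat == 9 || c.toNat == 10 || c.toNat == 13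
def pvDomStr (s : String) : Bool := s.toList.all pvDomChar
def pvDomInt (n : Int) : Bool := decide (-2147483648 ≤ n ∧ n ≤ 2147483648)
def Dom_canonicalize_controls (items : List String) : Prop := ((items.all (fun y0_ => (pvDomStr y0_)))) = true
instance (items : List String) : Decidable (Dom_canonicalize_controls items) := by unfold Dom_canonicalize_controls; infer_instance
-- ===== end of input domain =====

-- B replaces A's two-phase build (scan the fixed control list, then sort extras) by one
-- keyed sort of the deduplicated input; objective: simpler (not claimed faster).

-- ===== PORT A =====
def CONTROL_ORDER : List String :=
  ["AUD-001","AUD-002","AUD-003","AUD-004","AUD-005","AUD-006",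
   "AUD-007","AUD-008","AUD-009","AUD-010","AUD-011"]

def canonicalize_controls (items : List String) : List String :=
  -- seen = set(); ordered = []; for cid in CONTROL_ORDER: … (the pair (seen, ordered) is the fold state)
  (CONTROL_ORDER.foldl
    (fun (s : PySem.Set String × List String) cid =>
      if items.contains cid && !(PySem.Set.contains s.1 cid)
      then (PySem.Set.add s.1 cid, s.2 ++ [cid]) else s)
    (PySem.Set.empty, [])).2
  -- ordered.extend(sorted(set(items) - set(CONTROL_ORDER))); return ordered
  ++ PySem.List.sorted
      (PySem.Set.diff (PySem.Set.ofList items) (PySem.Set.ofList CONTROL_ORDER))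
      (fun x => x) false

-- ===== PORT B =====
-- _RANK = {c: i for i, c in enumerate(CONTROL_ORDER)}
def RANK : PySem.Dict String Int :=
  (PySem.List.enumerate CONTROL_ORDER).foldl
    (fun d p => PySem.Dict.insert d p.2 p.1) PySem.Dict.empty

def canonicalize_controls_alt (items : List String) : List String :=
  PySem.List.sorted2 (PySem.Set.ofList items)
    (fun c => PySem.Dict.getD RANK c (CONTROL_ORDER.length : Int))
    (fun c => c) false

-- ===== PRECONDITION & SPEC =====
def Spec_canonicalize_controls (items : List String) (out : List String) : Prop := out = canonicalize_controls_alt items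
instance (items : List String) (out : List String) : Decidable (Spec_canonicalize_controls items out) := by unfold Spec_canonicalize_controls; infer_instance

-- ===== CLAIM (what is proved, stated in full; the proofs are below) =====
def Claim_equal_canonicalize_controls : Prop := ∀ (items : List String), Dom_canonicalize_controls items → Spec_canonicalize_controls items (canonicalize_controls items)

-- ===== LEMMAS AND PROOFS =====

-- rank used by B's key
def pvRank (c : String) : Int := PySem.Dict.getD RANK c (CONTROL_ORDER.length : Int)

-- B's combined sort key, lexicographic
def pvKey (c : String) : Lex (Int × String) := toLex (pvRank c, c)

lemma pvKey_inj : Function.Injective pvKey := by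
  intro a b h
  exact congrArg (fun x => (ofLex x).2) h

lemma pvRank_of_mem {c : String} (h : c ∈ CONTROL_ORDER) : pvRank c < 11 := by
  simp only [CONTROL_ORDER, List.mem_cons, List.not_mem_nil, or_false] at h
  rcases h with rfl|rfl|rfl|rfl|rfl|rfl|rfl|rfl|rfl|rfl|rfl <;> decide

lemma RANK_items_eq : RANK.items =
    [("AUD-001",(0:Int)),("AUD-002",1),("AUD-003",2),("AUD-004",3),("AUD-005",4),
     ("AUD-006",5),("AUD-007",6),("AUD-008",7),("AUD-009",8),("AUD-010",9),("AUD-011",10)] := by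
  decide

lemma pvRank_of_not_mem {c : String} (h : c ∉ CONTROL_ORDER) : pvRank c = 11 := by
  have hf : List.find? (fun p => p.1 == c) RANK.items = none := by
    rw [List.find?_eq_none]
    intro p hp hbeq
    apply h
    have hpc : p.1 = c := eq_of_beq hbeq
    rw [RANK_items_eq] at hp
    fin_cases hp <;> simp_all [CONTROL_ORDER]
  simp [pvRank, PySem.Dict.getD, PySem.Dict.get?, hf, CONTROL_ORDER]

lemma control_nodup : CONTROL_ORDER.Nodup := by decide

-- A's for-loop: with a fresh `seen`, it appends exactly the controls present in `items`
lemma loopA (items l : List String) (hnd : l.Nodup)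
    (seen : PySem.Set String) (acc : List String)
    (hseen : ∀ c ∈ l, PySem.Set.contains seen c = false) :
    (l.foldl (fun (s : PySem.Set String × List String) cid =>
        if items.contains cid && !(PySem.Set.contains s.1 cid)
        then (PySem.Set.add s.1 cid, s.2 ++ [cid]) else s) (seen, acc)).2
      = acc ++ l.filter (fun c => items.contains c) := by
  induction l generalizing seen acc with
  | nil => simp
  | cons x t ih =>
    have hx : PySem.Set.contains seen x = false := hseen x (by simp)
    have hxt : x ∉ t := (List.nodup_cons.mp hnd).1
    have hndt : t.Nodup := (List.nodup_cons.mp hnd).2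
    simp only [List.foldl_cons, hx, Bool.not_false, Bool.and_true]
    by_cases hm : items.contains x = true
    · rw [if_pos hm]
      rw [ih hndt _ _ ?_]
      · rw [List.filter_cons_of_pos hm, List.append_assoc]
        rfl
      · intro c hc
        have hcx : c ≠ x := fun h => hxt (h ▸ hc)
        have h1 : PySem.Set.contains seen c = false := hseen c (List.mem_cons_of_mem _ hc)
        have hx' : x ∉ seen := by simpa [PySem.Set.contains] using hx
        simp only [PySem.Set.contains, List.contains_eq_mem, decide_eq_false_iff_not] at h1 ⊢
        simp [PySem.Set.add, PySem.Set.contains, hx', List.mem_append, h1, hcx]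
    · rw [if_neg hm]
      rw [ih hndt _ _ (fun c hc => hseen c (List.mem_cons_of_mem _ hc))]
      rw [List.filter_cons_of_neg (by exact hm)]

lemma canonA_eq (items : List String) :
    canonicalize_controls items
      = CONTROL_ORDER.filter (fun c => items.contains c)
        ++ PySem.List.sorted
            (PySem.Set.diff (PySem.Set.ofList items) (PySem.Set.ofList CONTROL_ORDER))
            (fun x => x) false := by
  unfold canonicalize_controls
  rw [loopA items CONTROL_ORDER control_nodup PySem.Set.empty [] (fun c _ => rfl)]
  rw [List.nil_append]

-- sorted2 with keys (k1, id) is sorting by the lexicographic key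
lemma sorted2_eq_sorted_lex (xs : List String) (k1 : String → Int) :
    PySem.List.sorted2 xs k1 (fun c => c) false
      = PySem.List.sorted xs (fun c => toLex (k1 c, c)) false := by
  have hbef : (fun a b => decide (k1 a < k1 b) || (!decide (k1 b < k1 a) && decide (a < b)))
      = (fun a b : String => decide ((toLex (k1 a, a) : Lex (Int × String)) < toLex (k1 b, b))) := by
    funext a b
    by_cases h1 : k1 a < k1 b
    · simp [h1, Prod.Lex.lt_iff]
    · by_cases h2 : k1 b < k1 a
      · have hne : ¬ k1 a = k1 b := by omega
        simp [h1, h2, Prod.Lex.lt_iff, hne]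
      · have heq : k1 a = k1 b := by omega
        simp [Prod.Lex.lt_iff, heq]
  simp only [PySem.List.sorted2, PySem.List.sorted, Bool.false_eq_true, if_false]
  rw [hbef]

theorem canonicalize_controls_eq (items : List String) :
    canonicalize_controls items = canonicalize_controls_alt items := by
  have hB : canonicalize_controls_alt items
      = PySem.List.sorted (PySem.Set.ofList items) pvKey false := by
    unfold canonicalize_controls_alt
    rw [sorted2_eq_sorted_lex]
    rfl
  set S : List String := PySem.Set.ofList items with hS
  set kP : List String := CONTROL_ORDER.filter (fun c => items.contains c) with hkP
  set ex : List String := PySem.List.sorted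
      (PySem.Set.diff S (PySem.Set.ofList CONTROL_ORDER)) (fun x => x) false with hex
  -- membership facts
  have hmemS : ∀ c, c ∈ S ↔ c ∈ items := fun c => PySem.Set.mem_ofList items c
  have hmem_ex : ∀ c, c ∈ ex ↔ (c ∈ items ∧ c ∉ CONTROL_ORDER) := by
    intro c
    rw [hex]
    rw [(PySem.List.sorted_perm _ _ _).mem_iff]
    simp [PySem.Set.diff, List.mem_filter, hmemS c, PySem.Set.contains, PySem.Set.mem_ofList]
  have hmem_kP : ∀ c, c ∈ kP ↔ (c ∈ CONTROL_ORDER ∧ c ∈ items) := by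
    intro c; simp [hkP, List.mem_filter]
  -- nodup facts
  have hndS : S.Nodup := PySem.Set.nodup_ofList items
  have hnd_ex : ex.Nodup := by
    rw [hex]
    exact (PySem.List.sorted_perm _ _ _).nodup_iff.mpr (List.Nodup.filter _ hndS)
  have hnd_kP : kP.Nodup := List.Nodup.filter _ control_nodup
  have hnd2 : (kP ++ ex).Nodup := by
    rw [List.nodup_append]
    refine ⟨hnd_kP, hnd_ex, ?_⟩
    intro a ha b hb hab
    exact ((hmem_ex b).mp hb).2 (hab ▸ ((hmem_kP a).mp ha).1)
  -- permutation
  have hperm : (PySem.List.sorted S pvKey false).Perm (kP ++ ex) := by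
    refine (PySem.List.sorted_perm _ _ _).trans ?_
    rw [List.perm_ext_iff_of_nodup hndS hnd2]
    intro c
    by_cases hco : c ∈ CONTROL_ORDER <;>
      simp [List.mem_append, hmem_kP c, hmem_ex c, hmemS c, hco]
  -- pairwise on the sorted side
  have hpw1 : List.Pairwise (fun a b => pvKey a ≤ pvKey b) (PySem.List.sorted S pvKey false) :=
    PySem.List.sorted_pairwise S pvKey
  -- pairwise on A's side
  have hpw_kP : List.Pairwise (fun a b => pvKey a ≤ pvKey b) kP := by
    refine List.Pairwise.sublist List.filter_sublist ?_
    decide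
  have hpw_ex : List.Pairwise (fun a b => pvKey a ≤ pvKey b) ex := by
    have h0 : List.Pairwise (fun a b : String => a ≤ b) ex :=
      PySem.List.sorted_pairwise _ (fun x : String => x)
    refine List.Pairwise.imp_of_mem ?_ h0
    intro a b ha hb hab
    have hra : pvRank a = 11 := pvRank_of_not_mem ((hmem_ex a).mp ha).2
    have hrb : pvRank b = 11 := pvRank_of_not_mem ((hmem_ex b).mp hb).2
    simp [pvKey, Prod.Lex.le_iff, hra, hrb, hab]
  have hpw2 : List.Pairwise (fun a b => pvKey a ≤ pvKey b) (kP ++ ex) := by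
    rw [List.pairwise_append]
    refine ⟨hpw_kP, hpw_ex, ?_⟩
    intro a ha b hb
    have hra : pvRank a < 11 := pvRank_of_mem ((hmem_kP a).mp ha).1
    have hrb : pvRank b = 11 := pvRank_of_not_mem ((hmem_ex b).mp hb).2
    simp [pvKey, Prod.Lex.le_iff]
    omega
  rw [canonA_eq, hB]
  exact (PySem.List.eq_of_perm_of_pairwise_le_of_injective pvKey pvKey_inj hperm hpw1 hpw2).symm

-- ===== VERDICT (by name: the statement is the Claim_ definition above) =====
theorem canonicalize_controls_spec : Claim_equal_canonicalize_controls := by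
  intro items _
  unfold Spec_canonicalize_controls
  exact canonicalize_controls_eq items
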